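-- pv_equiv track=rewrite | github.com/koytipita/AoC | aoc23/day14/day14.py | process_column
-- ===== SOURCE A (Python) =====
-- def process_column(column):
--     waiting_O = []
--     for index, obj in enumerate(column):
--         if obj == 'O':
--             waiting_O.append(index)
--         elif obj == '#':
--             for i in waiting_O:
--                 column[i] = '.'
--             for j in range(len(waiting_O)):
--                 column[index-j-1] = 'O'
--             waiting_O.clear()
--     for i in waiting_O:
--         column[i] = '.'
--     for j in range(len(waiting_O)):
--         column[len(column) - j - 1] = 'O'
--     waiting_O.clear()
--     return column
-- ===== SOURCE B (Python) =====
-- def process_column(column):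
--     # Segment-based rewrite: split at '#', rebuild each segment functionally
--     # (old 'O' cells become '.', the last count-of-'O' cells become 'O').
--     # Mutates the same list in place via column[:] = ... and returns it, like A.
--     out = []
--     seg = []
--
--     def flush():
--         k = seg.count('O')
--         out.extend('.' if c == 'O' else c for c in seg[:len(seg) - k])
--         out.extend(['O'] * k)
--         seg.clear()
--
--     for c in column:
--         if c == '#':
--             flush()
--             out.append('#')
--         else:
--             seg.append(c)
--     flush()
--     column[:] = out
--     return column
-- ===== Notes on version B (the rewrite author's own statement) =====
-- stated objective: idiomatic
-- what changed: B splits the column at '#' barriers and rebuilds each segment functionally (old 'O' cells become '.', the trailing count-of-'O' cells become 'O') in one forward pass, instead of A's index bookkeeping with a waiting list and in-place index assignments.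
import Mathlib
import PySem

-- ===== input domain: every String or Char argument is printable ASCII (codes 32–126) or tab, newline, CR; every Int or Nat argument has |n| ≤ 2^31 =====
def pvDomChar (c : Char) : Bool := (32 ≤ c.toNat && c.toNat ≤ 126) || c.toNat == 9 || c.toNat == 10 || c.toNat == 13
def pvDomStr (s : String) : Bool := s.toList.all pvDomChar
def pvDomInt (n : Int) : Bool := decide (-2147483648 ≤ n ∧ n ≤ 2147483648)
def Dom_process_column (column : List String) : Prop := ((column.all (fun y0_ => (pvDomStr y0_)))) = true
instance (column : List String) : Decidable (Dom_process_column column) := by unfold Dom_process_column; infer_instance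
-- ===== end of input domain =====

-- B rebuilds the column segment-by-segment between '#' barriers instead of A's waiting-list
-- index assignments; equivalence is about the returned value (both Pythons also mutate the
-- argument list in place to that same value).

-- ===== PORT A =====
-- Python list assignment column[i] = v (negative index wraps; out of range raises —
-- A's algorithm only ever produces in-range indices, so the else branch is unreachable).
def pvSet (xs : List String) (i : Int) (v : String) : List String :=
  let j := if i < 0 then i + xs.length else i
  if 0 ≤ j ∧ j < xs.length then xs.set j.toNat v else xs

-- the two inner for-loops A runs at a '#' (and once more at the end, with index = len(column))
def pvFlushA (col : List String) (w : List Int) (index : Int) : List String :=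
  let col1 := w.foldl (fun c i => pvSet c i ".") col
  (PySem.List.pyRange 0 w.length 1).foldl (fun c j => pvSet c (index - j - 1) "O") col1

def process_column (column : List String) : List String :=
  let st := (PySem.List.enumerate column 0).foldl
    (fun (st : List String × List Int) p =>
      if p.2 = "O" then (st.1, st.2 ++ [p.1])
      else if p.2 = "#" then (pvFlushA st.1 st.2 p.1, ([] : List Int))
      else st)
    (column, ([] : List Int))
  pvFlushA st.1 st.2 (st.1.length : Int)

-- ===== PORT B =====
-- flush(): rebuild one barrier-free segment
def pvFlushB (seg : List String) : List String :=
  let k := seg.count "O"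
  (seg.take (seg.length - k)).map (fun c => if c = "O" then "." else c) ++ List.replicate k "O"

def process_column_alt (column : List String) : List String :=
  let st := column.foldl
    (fun (st : List String × List String) c =>
      if c = "#" then (st.1 ++ pvFlushB st.2 ++ ["#"], ([] : List String))
      else (st.1, st.2 ++ [c]))
    (([] : List String), ([] : List String))
  st.1 ++ pvFlushB st.2

-- ===== PRECONDITION & SPEC =====
def Spec_process_column (column : List String) (out : List String) : Prop := out = process_column_alt column
instance (column : List String) (out : List String) : Decidable (Spec_process_column column out) := by unfold Spec_process_column; infer_instance

-- ===== CLAIM (what is proved, stated in full; the proofs are below) =====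
def Claim_equal_process_column : Prop := ∀ (column : List String), Dom_process_column column → Spec_process_column column (process_column column)

-- ===== LEMMAS AND PROOFS =====

-- indices (in the whole column) of the 'O' cells of the current segment, A's waiting_O
def oIdx : List String → Int → List Int
  | [], _ => []
  | c :: s, m => if c = "O" then m :: oIdx s (m + 1) else oIdx s (m + 1)

-- A's loop state, started from column = out ++ seg ++ rest with waiting_O = oIdx seg |out|
def stA (rest out seg : List String) : List String × List Int :=
  (PySem.List.enumerate rest ((out.length : Int) + (seg.length : Int))).foldl
    (fun (st : List String × List Int) p =>
      if p.2 = "O" then (st.1, st.2 ++ [p.1])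
      else if p.2 = "#" then (pvFlushA st.1 st.2 p.1, ([] : List Int))
      else st)
    (out ++ (seg ++ rest), oIdx seg (out.length : Int))

-- B's loop state from (out, seg)
def stB (rest out seg : List String) : List String × List String :=
  rest.foldl
    (fun (st : List String × List String) c =>
      if c = "#" then (st.1 ++ pvFlushB st.2 ++ ["#"], ([] : List String))
      else (st.1, st.2 ++ [c]))
    (out, seg)

theorem length_oIdx (seg : List String) (m : Int) : (oIdx seg m).length = seg.count "O" := by
  induction seg generalizing m with
  | nil => simp [oIdx]
  | cons c s ih =>
    by_cases h : c = "O" <;> simp [oIdx, h, ih]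

theorem oIdx_append (seg : List String) (c : String) (m : Int) :
    oIdx (seg ++ [c]) m =
      oIdx seg m ++ (if c = "O" then [m + seg.length] else []) := by
  induction seg generalizing m with
  | nil => by_cases h : c = "O" <;> simp [oIdx, h]
  | cons d s ih =>
    by_cases hc : c = "O"
    · subst hc
      by_cases hd : d = "O" <;>
        simp [oIdx, hd, ih, show ∀ (a b : Int), a + 1 + b = a + (b + 1) from
          fun a b => by ring]
    · by_cases hd : d = "O" <;> simp [oIdx, hd, hc, ih]

theorem pvSet_append (out t : List String) (c v : String) :
    pvSet (out ++ c :: t) (out.length : Int) v = out ++ v :: t := by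
  have h0 : ¬ ((out.length : Int) < 0) := by omega
  have h1 : (0 : Int) ≤ (out.length : Int) ∧
      (out.length : Int) < ((out ++ c :: t).length : Int) := by
    simp only [List.length_append, List.length_cons]
    omega
  simp only [pvSet, if_neg h0, if_pos h1, Int.toNat_natCast]
  rw [List.set_append_right _ _ (Nat.le_refl _)]
  simp

-- 'for i in waiting_O: column[i] = "."' blanks every 'O' of the segment
theorem dotLoop (seg : List String) : ∀ (out : List String) (rest : List String),
    (oIdx seg (out.length : Int)).foldl (fun c i => pvSet c i ".") (out ++ (seg ++ rest)) =
      out ++ (seg.map (fun c => if c = "O" then "." else c) ++ rest) := by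
  induction seg with
  | nil => intro out rest; simp [oIdx]
  | cons c s ih =>
    intro out rest
    by_cases h : c = "O"
    · subst h
      rw [show oIdx ("O" :: s) ((out.length : Int)) =
          (out.length : Int) :: oIdx s ((out.length : Int) + 1) from by simp [oIdx]]
      rw [List.foldl_cons,
        show out ++ ("O" :: s ++ rest) = out ++ "O" :: (s ++ rest) by simp]
      rw [pvSet_append out (s ++ rest) "O" "."]
      rw [show out ++ "." :: (s ++ rest) = (out ++ ["."]) ++ (s ++ rest) by simp]
      rw [show oIdx s ((out.length : Int) + 1) =
          oIdx s (((out ++ ["."]).length : Int)) from by simp]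
      rw [ih (out ++ ["."]) rest]
      simp
    · rw [show oIdx (c :: s) ((out.length : Int)) =
          oIdx s ((out.length : Int) + 1) from by simp [oIdx, h]]
      rw [show out ++ (c :: s ++ rest) = (out ++ [c]) ++ (s ++ rest) by simp]
      rw [show oIdx s ((out.length : Int) + 1) =
          oIdx s (((out ++ [c]).length : Int)) from by simp]
      rw [ih (out ++ [c]) rest]
      simp [h]

-- 'for j in range(k): column[index-j-1] = "O"' fills the last k cells of the segment
theorem oLoop (k : Nat) (out seg rest : List String) (hk : k ≤ seg.length) :
    (PySem.List.pyRange 0 (k : Int) 1).foldl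
        (fun c j => pvSet c (((out.length : Int) + (seg.length : Int)) - j - 1) "O")
        (out ++ (seg ++ rest)) =
      out ++ (seg.take (seg.length - k) ++ (List.replicate k "O" ++ rest)) := by
  induction k with
  | zero => simp
  | succ k ih =>
    have hk' : k ≤ seg.length := Nat.le_of_succ_le hk
    have hsplit : PySem.List.pyRange 0 ((k + 1 : Nat) : Int) 1 =
        PySem.List.pyRange 0 (k : Int) 1 ++ [(k : Int)] := by
      push_cast
      exact PySem.List.pyRange_one_succ_right (by positivity)
    rw [hsplit, List.foldl_append, ih hk']
    simp only [List.foldl_cons, List.foldl_nil]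
    have hlt : seg.length - (k + 1) < seg.length := by omega
    have htake : seg.take (seg.length - k) =
        seg.take (seg.length - (k + 1)) ++ [seg[seg.length - (k + 1)]] := by
      have h' : seg.length - k = (seg.length - (k + 1)) + 1 := by omega
      rw [h', List.take_add_one, List.getElem?_eq_getElem hlt]
      simp
    rw [htake]
    rw [show out ++ ((seg.take (seg.length - (k + 1)) ++ [seg[seg.length - (k + 1)]]) ++
        (List.replicate k "O" ++ rest)) =
        (out ++ seg.take (seg.length - (k + 1))) ++
          (seg[seg.length - (k + 1)] :: (List.replicate k "O" ++ rest)) from by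
      simp only [List.append_assoc, List.singleton_append]]
    rw [show ((out.length : Int) + (seg.length : Int)) - (k : Int) - 1 =
        (((out ++ seg.take (seg.length - (k + 1))).length : Int)) by
      simp [List.length_take]; omega]
    rw [pvSet_append]
    simp only [List.append_assoc, List.replicate_succ, List.cons_append]

theorem length_pvFlushB (seg : List String) : (pvFlushB seg).length = seg.length := by
  have : seg.count "O" ≤ seg.length := List.count_le_length
  simp [pvFlushB, List.length_take]
  omega

-- A's double flush loop equals B's segment rebuild
theorem flushA_eq (out seg rest : List String) :
    pvFlushA (out ++ (seg ++ rest)) (oIdx seg (out.length : Int))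
        ((out.length : Int) + (seg.length : Int)) =
      out ++ (pvFlushB seg ++ rest) := by
  unfold pvFlushA pvFlushB
  rw [dotLoop, length_oIdx]
  have hle : seg.count "O" ≤ seg.length := List.count_le_length
  have h := oLoop (seg.count "O") out (seg.map (fun c => if c = "O" then "." else c)) rest
    (by simpa using hle)
  simp only [List.length_map] at h
  rw [h]
  simp [List.map_take]

-- one step of A's loop, phrased on the invariant state
theorem stA_cons (c : String) (rs out seg : List String) :
    stA (c :: rs) out seg =
      if c = "O" then stA rs out (seg ++ ["O"])
      else if c = "#" then stA rs (out ++ pvFlushB seg ++ ["#"]) []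
      else stA rs out (seg ++ [c]) := by
  unfold stA
  rw [PySem.List.enumerate_cons]
  simp only [List.foldl_cons]
  by_cases hO : c = "O"
  · subst hO
    rw [if_pos rfl, if_pos rfl]
    congr 1
    · rw [oIdx_append]
      simp
    · congr 1
      simp only [List.length_append, List.length_cons, List.length_nil, Nat.cast_add,
        Nat.cast_one, Nat.cast_zero]
      ring
  · by_cases hH : c = "#"
    · subst hH
      rw [if_pos rfl, if_neg (by decide : ¬ ("#" = "O")), if_pos rfl]
      congr 1
      · rw [flushA_eq out seg ("#" :: rs)]
        simp [oIdx]
      · congr 1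
        simp only [List.length_append, List.length_cons, List.length_nil, length_pvFlushB,
          Nat.cast_add, Nat.cast_one, Nat.cast_zero]
        ring
    · rw [if_neg hO, if_neg hH, if_neg hO, if_neg hH]
      congr 1
      · rw [oIdx_append]
        simp [hO]
      · congr 1
        simp only [List.length_append, List.length_cons, List.length_nil, Nat.cast_add,
          Nat.cast_one, Nat.cast_zero]
        ring

-- one step of B's loop
theorem stB_cons (c : String) (rs out seg : List String) :
    stB (c :: rs) out seg =
      if c = "#" then stB rs (out ++ pvFlushB seg ++ ["#"]) []
      else stB rs out (seg ++ [c]) := by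
  unfold stB
  simp only [List.foldl_cons]
  by_cases h : c = "#" <;> simp [h]

-- the loop invariant: A's state is (out ++ seg ++ rest, oIdx seg |out|) where (out, seg)
-- is B's state and the enumerate offset is |out| + |seg|; afterwards both flush
theorem mainLoop (rest : List String) : ∀ (out seg : List String),
    pvFlushA (stA rest out seg).1 (stA rest out seg).2 (((stA rest out seg).1.length : Int)) =
      (stB rest out seg).1 ++ pvFlushB (stB rest out seg).2 := by
  induction rest with
  | nil =>
    intro out seg
    simp only [stA, stB, PySem.List.enumerate_nil, List.foldl_nil]
    have h := flushA_eq out seg []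
    simp only [List.append_nil] at h ⊢
    rw [← h]
    congr 1
    simp
  | cons c rs ih =>
    intro out seg
    rw [stA_cons, stB_cons]
    by_cases hO : c = "O"
    · subst hO
      rw [if_pos rfl, if_neg (by decide : ¬ ("O" = "#"))]
      exact ih out (seg ++ ["O"])
    · by_cases hH : c = "#"
      · subst hH
        rw [if_pos rfl, if_pos rfl]
        exact ih (out ++ pvFlushB seg ++ ["#"]) []
      · rw [if_neg hO, if_neg hH, if_neg hH]
        exact ih out (seg ++ [c])

-- ===== VERDICT (by name: the statement is the Claim_ definition above) =====
theorem process_column_spec : Claim_equal_process_column := by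
  intro column _
  unfold Spec_process_column process_column process_column_alt
  have h := mainLoop column [] []
  rw [stA, stB] at h
  simpa [oIdx] using h
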